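-- pv_equiv track=rewrite | github.com/yuryanliang/princewen-leetcode-python | Ryan/texti/ball.py | balls_re
-- ===== SOURCE A (Python) =====
-- def balls_re(balls):
--     balls.sort()
--     max_nums_stay = 0
--     slow_pt = 0
--     for fast_pt in range(len(balls)):
--         while balls[fast_pt] - len(balls) - balls[slow_pt] >= 0:  # while slow pt ball  within the range of ball fast pt ball
--             slow_pt += 1
--
--         cur_num_stay = fast_pt - slow_pt + 1
--         # num_stay
--         max_nums_stay = max(max_nums_stay, cur_num_stay)
--     moves=len(balls)-max_nums_stay
--     return moves
-- ===== SOURCE B (Python) =====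
-- def _bisect_right(a, x):
--     # hand-written bisect.bisect_right (no imports, matching A's import-free module)
--     lo, hi = 0, len(a)
--     while lo < hi:
--         mid = (lo + hi) // 2
--         if a[mid] <= x:
--             lo = mid + 1
--         else:
--             hi = mid
--     return lo
--
-- def balls_re(balls):
--     balls.sort()
--     n = len(balls)
--     max_nums_stay = 0
--     for fast in range(n):
--         slow = _bisect_right(balls, balls[fast] - n)
--         max_nums_stay = max(max_nums_stay, fast - slow + 1)
--     return n - max_nums_stay
-- ===== Notes on version B (the rewrite author's own statement) =====
-- stated objective: alternative
-- what changed: Replaces A's carried two-pointer (slow index advanced by an inner while loop across iterations) with an independent hand-written binary search (bisect_right) per element over the sorted list to find the window start.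
import Mathlib
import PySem

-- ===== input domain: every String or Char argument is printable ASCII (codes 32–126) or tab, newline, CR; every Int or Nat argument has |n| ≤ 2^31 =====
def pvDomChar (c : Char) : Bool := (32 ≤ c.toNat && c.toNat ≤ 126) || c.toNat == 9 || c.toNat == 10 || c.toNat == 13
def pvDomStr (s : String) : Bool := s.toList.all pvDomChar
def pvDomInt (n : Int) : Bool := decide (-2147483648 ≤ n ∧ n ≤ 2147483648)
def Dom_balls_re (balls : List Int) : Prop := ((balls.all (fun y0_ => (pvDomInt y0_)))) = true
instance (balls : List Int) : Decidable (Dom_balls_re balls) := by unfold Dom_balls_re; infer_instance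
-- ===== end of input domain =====

-- B replaces A's carried two-pointer `slow` with a per-element hand-written binary search
-- (bisect_right) over the sorted list; equivalence is about the RETURN value (both A and B
-- sort the argument in place, the same mutation).

-- ===== PORT A =====
/-- A's inner `while balls[fast_pt] - len(balls) - balls[slow_pt] >= 0: slow_pt += 1`.
    The fuel argument only makes the loop total; it is never exhausted on inputs A accepts
    (the loop advances `slow` at most `length` times). `pyGetD … 0` is exact here because
    the index stays in range on every input A accepts (A never raises). -/
def ballsAdvance (s : List Int) (x : Int) (slow : Nat) : Nat → Nat
  | 0 => slow
  | fuel+1 =>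
    if x - (s.length : Int) - PySem.List.pyGetD s (slow : Int) 0 ≥ 0 then
      ballsAdvance s x (slow + 1) fuel
    else slow

def balls_re (balls : List Int) : Int :=
  let s := PySem.List.sorted balls (fun y => y) false
  let st := (List.range s.length).foldl (fun (st : Int × Nat) (fast : Nat) =>
      let slow := ballsAdvance s (PySem.List.pyGetD s (fast : Int) 0) st.2 s.length
      (max st.1 ((fast : Int) - (slow : Int) + 1), slow)) (0, 0)
  (s.length : Int) - st.1

-- ===== PORT B =====
/-- Source B's hand-written `_bisect_right(a, x)` loop, recursion on `hi - lo`.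
    Nat `/ 2` is exact for Python's `// 2` here: `lo`, `hi` are nonnegative. -/
def bisectR (s : List Int) (x : Int) (lo hi : Nat) : Nat :=
  if lo < hi then
    let mid := (lo + hi) / 2
    if PySem.List.pyGetD s (mid : Int) 0 ≤ x then bisectR s x (mid + 1) hi
    else bisectR s x lo mid
  else lo
termination_by hi - lo
decreasing_by all_goals omega

def balls_re_alt (balls : List Int) : Int :=
  let s := PySem.List.sorted balls (fun y => y) false
  let n := s.length
  let best := (List.range n).foldl (fun (b : Int) (fast : Nat) =>
      let slow := bisectR s (PySem.List.pyGetD s (fast : Int) 0 - (n : Int)) 0 n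
      max b ((fast : Int) - (slow : Int) + 1)) 0
  (n : Int) - best

-- ===== PRECONDITION & SPEC =====
def Spec_balls_re (balls : List Int) (out : Int) : Prop := out = balls_re_alt balls
instance (balls : List Int) (out : Int) : Decidable (Spec_balls_re balls out) := by unfold Spec_balls_re; infer_instance

-- ===== CLAIM (what is proved, stated in full; the proofs are below) =====
def Claim_equal_balls_re : Prop := ∀ (balls : List Int), Dom_balls_re balls → Spec_balls_re balls (balls_re balls)

-- ===== LEMMAS AND PROOFS =====

/-- the number of elements of `s` that are `≤ t` — the common value of A's final `slow`
    and B's bisect result for threshold `t`. -/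
def ballsCnt (s : List Int) (t : Int) : Nat := s.countP (fun a => decide (a ≤ t))

lemma ballsCnt_mono (s : List Int) {t t' : Int} (h : t ≤ t') : ballsCnt s t ≤ ballsCnt s t' := by
  apply List.countP_mono_left
  intro a _ ha
  simp only [decide_eq_true_eq] at *
  omega

lemma sorted_cnt_iff (s : List Int) (hp : s.Pairwise (· ≤ ·)) (t : Int) :
    ∀ i < s.length, (s.getD i 0 ≤ t ↔ i < ballsCnt s t) := by
  induction s with
  | nil => intro i hi; simp at hi
  | cons a u ih =>
    rcases List.pairwise_cons.1 hp with ⟨ha, hu⟩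
    intro i hi
    have hzero : (¬ a ≤ t) → ballsCnt (a :: u) t = 0 := by
      intro hat
      simp only [ballsCnt, List.countP_cons]
      have : u.countP (fun b => decide (b ≤ t)) = 0 := by
        apply List.countP_eq_zero.2
        intro b hb
        have := ha b hb
        simp only [decide_eq_true_eq]
        omega
      simp [this, hat]
    match i with
    | 0 =>
      simp only [List.getD, List.getElem?_cons_zero, Option.getD_some]
      constructor
      · intro h
        simp only [ballsCnt, List.countP_cons, h]
        simp
      · intro h
        by_contra hat
        rw [hzero hat] at h
        omega
    | i+1 =>
      have hlen : i < u.length := by simpa using hi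
      have := ih hu i hlen
      by_cases hat : a ≤ t
      · have : ballsCnt (a :: u) t = ballsCnt u t + 1 := by
          simp [ballsCnt, hat]
        rw [this]
        simpa using (ih hu i hlen).trans (by omega)
      · rw [hzero hat]
        have hb : u.getD i 0 ∈ u := by
          rw [List.getD_eq_getElem _ _ hlen]; exact List.getElem_mem hlen
        have : ¬ u.getD i 0 ≤ t := by have := ha _ hb; omega
        simp only [List.getD_cons_succ]
        constructor
        · intro h; exact absurd h this
        · intro h; omega

lemma advance_eq (s : List Int) (hp : s.Pairwise (· ≤ ·)) (x : Int)
    (hlt : ballsCnt s (x - (s.length : Int)) < s.length) :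
    ∀ fuel slow, slow ≤ ballsCnt s (x - (s.length : Int)) →
      ballsCnt s (x - (s.length : Int)) - slow ≤ fuel →
      ballsAdvance s x slow fuel = ballsCnt s (x - (s.length : Int)) := by
  intro fuel
  induction fuel with
  | zero => intro slow h1 h2; simp only [ballsAdvance]; omega
  | succ k ih =>
    intro slow h1 h2
    set c := ballsCnt s (x - (s.length : Int)) with hc
    rcases lt_or_eq_of_le h1 with h | h
    · have hsl : slow < s.length := lt_trans h hlt
      have := (sorted_cnt_iff s hp (x - (s.length : Int)) slow hsl).2 h
      simp only [ballsAdvance, PySem.List.pyGetD_natCast]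
      rw [if_pos (by omega)]
      exact ih (slow + 1) (by omega) (by omega)
    · have hnot : ¬ s.getD slow 0 ≤ x - (s.length : Int) := fun hle =>
        absurd ((sorted_cnt_iff s hp (x - (s.length : Int)) slow (h ▸ hlt)).1 hle) (by omega)
      simp only [ballsAdvance, PySem.List.pyGetD_natCast]
      rw [if_neg (by omega)]
      omega

lemma bisect_eq (s : List Int) (hp : s.Pairwise (· ≤ ·)) (t : Int) :
    ∀ k lo hi, hi - lo ≤ k → lo ≤ ballsCnt s t → ballsCnt s t ≤ hi → hi ≤ s.length →
      bisectR s t lo hi = ballsCnt s t := by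
  intro k
  induction k with
  | zero => intro lo hi h1 h2 h3 _; rw [bisectR]; rw [if_neg (by omega)]; omega
  | succ m ih =>
    intro lo hi h1 h2 h3 h4
    by_cases hlh : lo < hi
    · rw [bisectR, if_pos hlh]
      simp only [PySem.List.pyGetD_natCast]
      set mid := (lo + hi) / 2 with hmid
      have hmlo : lo ≤ mid := by omega
      have hmhi : mid < hi := by omega
      have hmlen : mid < s.length := lt_of_lt_of_le hmhi h4
      by_cases hle : s.getD mid 0 ≤ t
      · rw [if_pos hle]
        have := (sorted_cnt_iff s hp t mid hmlen).1 hle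
        exact ih (mid + 1) hi (by omega) (by omega) h3 h4
      · rw [if_neg hle]
        have : ¬ mid < ballsCnt s t := fun h => hle ((sorted_cnt_iff s hp t mid hmlen).2 h)
        exact ih lo mid (by omega) h2 (by omega) (le_of_lt hmlen)
    · rw [bisectR, if_neg hlh]; omega

lemma getD_mono (s : List Int) (hp : s.Pairwise (· ≤ ·)) {i j : Nat}
    (hij : i ≤ j) (hj : j < s.length) : s.getD i 0 ≤ s.getD j 0 := by
  rcases eq_or_lt_of_le hij with h | h
  · subst h; exact le_refl _
  · rw [List.getD_eq_getElem _ _ (lt_trans h hj), List.getD_eq_getElem _ _ hj]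
    exact List.pairwise_iff_getElem.1 hp i j _ _ h

lemma fold_eq (s : List Int) (hp : s.Pairwise (· ≤ ·)) :
    ∀ (l : List Nat), (∀ f ∈ l, f < s.length) → l.Pairwise (· ≤ ·) →
      ∀ (slow : Nat) (acc : Int), (∀ f ∈ l, slow ≤ ballsCnt s (s.getD f 0 - (s.length : Int))) →
      (l.foldl (fun (st : Int × Nat) (fast : Nat) =>
          let slow := ballsAdvance s (PySem.List.pyGetD s (fast : Int) 0) st.2 s.length
          (max st.1 ((fast : Int) - (slow : Int) + 1), slow)) (acc, slow)).1
      = l.foldl (fun (b : Int) (fast : Nat) =>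
          let slow := bisectR s (PySem.List.pyGetD s (fast : Int) 0 - (s.length : Int)) 0 s.length
          max b ((fast : Int) - (slow : Int) + 1)) acc := by
  intro l
  induction l with
  | nil => intro _ _ slow acc _; rfl
  | cons f rest ih =>
    intro hmem hpw slow acc hslow
    have hf : f < s.length := hmem f List.mem_cons_self
    have hone : (1 : Int) ≤ (s.length : Int) := by exact_mod_cast Nat.one_le_iff_ne_zero.2 (by omega)
    have hnotf : ¬ s.getD f 0 ≤ s.getD f 0 - (s.length : Int) := by omega
    have hcf : ballsCnt s (s.getD f 0 - (s.length : Int)) ≤ f := by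
      by_contra h
      exact hnotf ((sorted_cnt_iff s hp _ f hf).2 (by omega))
    have hlt : ballsCnt s (s.getD f 0 - (s.length : Int)) < s.length := lt_of_le_of_lt hcf hf
    have hadv : ballsAdvance s (PySem.List.pyGetD s (f : Int) 0) slow s.length
        = ballsCnt s (s.getD f 0 - (s.length : Int)) := by
      rw [PySem.List.pyGetD_natCast]
      exact advance_eq s hp (s.getD f 0) hlt s.length slow
        (hslow f List.mem_cons_self) (by omega)
    have hbis : bisectR s (PySem.List.pyGetD s (f : Int) 0 - (s.length : Int)) 0 s.length
        = ballsCnt s (s.getD f 0 - (s.length : Int)) := by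
      rw [PySem.List.pyGetD_natCast]
      exact bisect_eq s hp _ s.length 0 s.length (by omega) (Nat.zero_le _)
        (le_of_lt hlt) (le_refl _)
    rw [List.foldl_cons, List.foldl_cons]
    simp only [hadv, hbis]
    apply ih
    · intro g hg; exact hmem g (List.mem_cons_of_mem _ hg)
    · exact (List.pairwise_cons.1 hpw).2
    · intro g hg
      have hfg : f ≤ g := (List.pairwise_cons.1 hpw).1 g hg
      have hg' : g < s.length := hmem g (List.mem_cons_of_mem _ hg)
      exact ballsCnt_mono s (by have := getD_mono s hp hfg hg'; omega)

-- ===== VERDICT (by name: the statement is the Claim_ definition above) =====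
theorem balls_re_spec : Claim_equal_balls_re := by
  intro balls _
  unfold Spec_balls_re balls_re balls_re_alt
  set s := PySem.List.sorted balls (fun y => y) false with hs
  have hp : s.Pairwise (· ≤ ·) := PySem.List.sorted_pairwise balls (fun y => y)
  have := fold_eq s hp (List.range s.length)
    (fun f hf => List.mem_range.1 hf)
    ((List.pairwise_lt_range).imp le_of_lt)
    0 0 (fun f _ => Nat.zero_le _)
  simp only [this]
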